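-- pv_equiv track=rewrite | github.com/safrano9999/CODEANALYST | shell_special_cases.py | _has_unescaped_quote
-- ===== SOURCE A (Python) =====
-- def _has_unescaped_quote(text: str, quote: str) -> bool:
--     escaped = False
--     for ch in text:
--         if quote == '"' and ch == "\\" and not escaped:
--             escaped = True
--             continue
--         if ch == quote and not escaped:
--             return True
--         escaped = False
--     return False
-- ===== SOURCE B (Python) =====
-- def _has_unescaped_quote(text: str, quote: str) -> bool:
--     if quote != '"':
--         # escaping is only recognised for the double-quote character, so this
--         # is a plain membership test for a single-character quote
--         return len(quote) == 1 and quote in text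
--     i, n = 0, len(text)
--     while i < n:
--         if text[i] == "\\":
--             i += 2  # consume the escaped character
--         elif text[i] == '"':
--             return True
--         else:
--             i += 1
--     return False
-- ===== Notes on version B (the rewrite author's own statement) =====
-- stated objective: alternative
-- what changed: B dispatches on the quote: for any quote other than '"' the loop disappears into a length-1-and-membership test (C-level 'in'), and for '"' it keeps an index cursor that jumps two positions past a backslash instead of carrying A's boolean escaped flag.
import Mathlib
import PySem

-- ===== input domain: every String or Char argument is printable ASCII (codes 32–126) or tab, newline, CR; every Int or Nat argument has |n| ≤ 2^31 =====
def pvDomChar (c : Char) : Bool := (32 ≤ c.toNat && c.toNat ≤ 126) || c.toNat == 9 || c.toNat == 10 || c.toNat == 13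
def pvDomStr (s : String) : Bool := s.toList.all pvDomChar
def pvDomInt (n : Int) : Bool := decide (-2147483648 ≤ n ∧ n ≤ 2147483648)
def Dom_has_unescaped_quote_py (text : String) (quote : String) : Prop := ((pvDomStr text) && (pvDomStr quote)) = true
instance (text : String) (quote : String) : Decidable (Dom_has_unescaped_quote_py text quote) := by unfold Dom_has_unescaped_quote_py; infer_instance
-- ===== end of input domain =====

-- B replaces A's escaped-flag loop by a dispatch on the quote: a membership test for any
-- quote other than '"', and a cursor that skips two characters past a backslash for '"'.

-- ===== PORT A =====
-- 'for ch in text' with the escaped flag; early return becomes the 'true' leaf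
def hqGoA (qs : List Char) : List Char → Bool → Bool
  | [], _ => false
  | ch :: rest, escaped =>
    if qs = ['"'] ∧ ch = '\\' ∧ escaped = false then hqGoA qs rest true
    else if [ch] = qs ∧ escaped = false then true
    else hqGoA qs rest false

def has_unescaped_quote_py (text : String) (quote : String) : Bool :=
  hqGoA quote.toList text.toList false

-- ===== PORT B =====
-- the 'while i < n' cursor of Source B on the remaining characters; '\' consumes two
def hqGoB : List Char → Bool
  | [] => false
  | ch :: rest =>
    if ch = '\\' then
      match rest with
      | [] => false
      | _ :: rest' => hqGoB rest'
    else if ch = '"' then true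
    else hqGoB rest

def has_unescaped_quote_py_alt (text : String) (quote : String) : Bool :=
  if quote ≠ "\"" then decide (quote.toList.length = 1) && PySem.Str.isIn quote text
  else hqGoB text.toList

-- ===== PRECONDITION & SPEC =====
def Spec_has_unescaped_quote_py (text : String) (quote : String) (out : Bool) : Prop := out = has_unescaped_quote_py_alt text quote
instance (text : String) (quote : String) (out : Bool) : Decidable (Spec_has_unescaped_quote_py text quote out) := by unfold Spec_has_unescaped_quote_py; infer_instance

-- ===== CLAIM (what is proved, stated in full; the proofs are below) =====
def Claim_equal_has_unescaped_quote_py : Prop := ∀ (text : String) (quote : String), Dom_has_unescaped_quote_py text quote → Spec_has_unescaped_quote_py text quote (has_unescaped_quote_py text quote)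

-- ===== LEMMAS AND PROOFS =====

-- with any quote other than ['"'], A's escape branch never fires and the loop is a membership scan
lemma hqGoA_ne {qs : List Char} (h : qs ≠ ['"']) :
    ∀ l : List Char, hqGoA qs l false = l.any (fun ch => [ch] = qs) := by
  intro l
  induction l with
  | nil => simp [hqGoA]
  | cons ch rest ih =>
    by_cases hc : [ch] = qs
    · simp [hqGoA, h, hc]
    · simp [hqGoA, h, hc, ih]

lemma mem_iff_singleton_infix {α : Type} (a : α) (l : List α) : a ∈ l ↔ [a] <:+: l := by
  constructor
  · intro hm
    obtain ⟨s, t, rfl⟩ := List.append_of_mem hm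
    exact ⟨s, t, by simp⟩
  · rintro ⟨s, t, rfl⟩
    simp

-- A with quote '"' equals B's cursor loop
lemma hqGoA_quote_eq_hqGoB : ∀ n (l : List Char), l.length ≤ n → hqGoA ['"'] l false = hqGoB l := by
  intro n
  induction n with
  | zero =>
    intro l hl
    have : l = [] := List.eq_nil_of_length_eq_zero (Nat.le_zero.mp hl)
    simp [this, hqGoA, hqGoB]
  | succ n ih =>
    intro l hl
    match l with
    | [] => simp [hqGoA, hqGoB]
    | ch :: rest =>
      by_cases hb : ch = '\\'
      · subst hb
        match rest with
        | [] => simp [hqGoA, hqGoB]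
        | c :: r =>
          have hr : r.length ≤ n := by
            simp at hl; omega
          simp only [hqGoA, hqGoB]
          simp [ih r hr]
      · by_cases hq : ch = '"'
        · subst hq
          rw [hqGoB.eq_def]
          simp [hqGoA]
        · have hr : rest.length ≤ n := by simp at hl; omega
          rw [hqGoB.eq_def]
          simp [hqGoA, hb, hq, ih rest hr]

-- ===== VERDICT (by name: the statement is the Claim_ definition above) =====
theorem has_unescaped_quote_py_spec : Claim_equal_has_unescaped_quote_py := by
  intro text quote _
  unfold Spec_has_unescaped_quote_py has_unescaped_quote_py has_unescaped_quote_py_alt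
  by_cases h : quote = "\""
  · subst h
    simp [hqGoA_quote_eq_hqGoB text.toList.length text.toList le_rfl]
  · have hq : quote.toList ≠ ['"'] := by
      intro hc
      apply h
      have := congrArg String.ofList hc
      simpa using this
    rw [if_pos h, hqGoA_ne hq]
    rcases hl : quote.toList with _ | ⟨c, _ | ⟨d, r⟩⟩
    · simp
    · -- single character quote: a membership test
      simp only [hl, List.length_cons, List.length_nil, Nat.zero_add,
        decide_true, Bool.true_and, PySem.Str.isIn_eq]
      rw [eq_comm, Bool.eq_iff_iff, PySem.Chars.isIn_iff_infix]
      simp only [List.any_eq_true, decide_eq_true_eq, List.cons.injEq, and_true]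
      constructor
      · intro hin
        exact ⟨c, (mem_iff_singleton_infix _ _).mpr hin, rfl⟩
      · rintro ⟨ch, hm, rfl⟩
        exact (mem_iff_singleton_infix _ _).mp hm
    · -- quote of length ≥ 2: both sides are false
      simp [hl]
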